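-- pv_equiv track=rewrite | github.com/yuying16yy/DataEngineerTakeHomeChallenge | assessment_answer.py | dedup_rows
-- ===== SOURCE A (Python) =====
-- def dedup_rows(input_data):
--     seen = set()
--     new_l = []
--     duplicated = []
--     for d in input_data:
--         t = tuple(d.items())
--         check = (t[0], t[-1])
--         if check not in seen:
--             seen.add(check)
--             new_l.append(d)
--         else:
--             duplicated.append(d)
--     return duplicated
-- ===== SOURCE B (Python) =====
-- def dedup_rows(input_data):
--     # Pass 1: map each (first item, last item) key to the index of its first occurrence.
--     first_index = {}
--     for i, d in enumerate(input_data):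
--         items = tuple(d.items())
--         key = (items[0], items[-1])
--         if key not in first_index:
--             first_index[key] = i
--     # Pass 2: a row is a duplicate iff it is not the first occurrence of its key.
--     result = []
--     for i, d in enumerate(input_data):
--         items = tuple(d.items())
--         key = (items[0], items[-1])
--         if first_index[key] != i:
--             result.append(d)
--     return result
-- ===== Notes on version B (the rewrite author's own statement) =====
-- stated objective: alternative
-- what changed: B replaces A's single pass with an inline seen-set by two passes: first build a first-occurrence index table keyed by (first item, last item), then collect every row whose index differs from its key's first index.
import Mathlib
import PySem

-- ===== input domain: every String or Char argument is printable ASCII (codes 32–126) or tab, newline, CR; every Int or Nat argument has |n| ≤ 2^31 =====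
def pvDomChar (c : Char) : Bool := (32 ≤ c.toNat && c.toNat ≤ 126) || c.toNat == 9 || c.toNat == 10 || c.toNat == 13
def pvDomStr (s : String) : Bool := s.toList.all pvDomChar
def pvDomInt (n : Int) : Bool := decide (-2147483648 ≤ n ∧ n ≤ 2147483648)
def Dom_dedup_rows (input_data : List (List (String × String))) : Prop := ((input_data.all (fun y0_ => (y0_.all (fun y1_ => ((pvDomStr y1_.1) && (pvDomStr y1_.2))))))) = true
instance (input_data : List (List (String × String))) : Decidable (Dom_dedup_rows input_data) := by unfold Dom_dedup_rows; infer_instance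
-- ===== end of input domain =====

-- B is an alternative decomposition (same cost): a first pass building a first-occurrence
-- index table, then a second pass keeping rows whose index differs from their key's first index.
-- Both Pythons raise IndexError on a row that is an empty dict; Pre_ excludes exactly those inputs.

-- ===== PORT A =====

-- key of a row: (t[0], t[-1]) of tuple(d.items()); none = IndexError (empty dict)
def pvKey? (d : List (String × String)) :
    Option ((String × String) × (String × String)) :=
  match PySem.List.pyGet? d 0, PySem.List.pyGet? d (-1) with
  | some a, some b => some (a, b)
  | _, _ => none

-- A's loop body on state (seen, new_l, duplicated); unreachable 'none' keeps the state
def pvStepA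
    (st : PySem.Set ((String × String) × (String × String))
          × List (List (String × String)) × List (List (String × String)))
    (d : List (String × String)) :
    PySem.Set ((String × String) × (String × String))
      × List (List (String × String)) × List (List (String × String)) :=
  match pvKey? d with
  | none => st  -- Python raises IndexError here (outside Pre_)
  | some check =>
    if check ∉ st.1 then (PySem.Set.add st.1 check, st.2.1 ++ [d], st.2.2)
    else (st.1, st.2.1, st.2.2 ++ [d])

def dedup_rows (input_data : List (List (String × String))) :
    List (List (String × String)) :=
  (input_data.foldl pvStepA (PySem.Set.empty, [], [])).2.2

-- ===== PORT B =====

-- pass 1: for i, d in enumerate(...): if key not in first_index: first_index[key] = i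
def pvBuildIdx
    (fi : PySem.Dict ((String × String) × (String × String)) Nat) (i : Nat) :
    List (List (String × String)) →
      PySem.Dict ((String × String) × (String × String)) Nat
  | [] => fi
  | d :: rest =>
    match pvKey? d with
    | none => pvBuildIdx fi (i + 1) rest  -- Python raises IndexError here (outside Pre_)
    | some k =>
      pvBuildIdx (if (fi.get? k).isNone then fi.insert k i else fi) (i + 1) rest

-- pass 2: for i, d in enumerate(...): if first_index[key] != i: result.append(d)
def pvCollect
    (fi : PySem.Dict ((String × String) × (String × String)) Nat) (i : Nat) :
    List (List (String × String)) → List (List (String × String))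
  | [] => []
  | d :: rest =>
    match pvKey? d with
    | none => pvCollect fi (i + 1) rest  -- Python raises IndexError here (outside Pre_)
    | some k =>
      match fi.get? k with
      | none => pvCollect fi (i + 1) rest  -- KeyError, unreachable after pass 1
      | some j =>
        if j ≠ i then d :: pvCollect fi (i + 1) rest else pvCollect fi (i + 1) rest

def dedup_rows_alt (input_data : List (List (String × String))) :
    List (List (String × String)) :=
  pvCollect (pvBuildIdx PySem.Dict.empty 0 input_data) 0 input_data

-- ===== PRECONDITION & SPEC =====
-- Pre_ excludes inputs containing an empty row (empty dict): there Python A raises IndexError on t[0].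
def Pre_dedup_rows (input_data : List (List (String × String))) : Prop :=
  ∀ d ∈ input_data, d ≠ []
instance (input_data : List (List (String × String))) : Decidable (Pre_dedup_rows input_data) := by unfold Pre_dedup_rows; infer_instance

def pvWitness_dedup_rows : (List (List (String × String))) :=
  [[("a", "1")], [("a", "1")], [("b", "2")]]

def Spec_dedup_rows (input_data : List (List (String × String))) (out : List (List (String × String))) : Prop := out = dedup_rows_alt input_data
instance (input_data : List (List (String × String))) (out : List (List (String × String))) : Decidable (Spec_dedup_rows input_data out) := by unfold Spec_dedup_rows; infer_instance

-- ===== CLAIM (what is proved, stated in full; the proofs are below) =====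
def Claim_equal_dedup_rows : Prop := ∀ (input_data : List (List (String × String))), Dom_dedup_rows input_data → Pre_dedup_rows input_data → Spec_dedup_rows input_data (dedup_rows input_data)

-- ===== LEMMAS AND PROOFS =====

-- common reference: duplicates of l given the already-seen key list
def pvDupSpec (seen : List ((String × String) × (String × String))) :
    List (List (String × String)) → List (List (String × String))
  | [] => []
  | d :: rest =>
    match pvKey? d with
    | none => pvDupSpec seen rest
    | some k =>
      if k ∈ seen then d :: pvDupSpec seen rest else pvDupSpec (k :: seen) rest

theorem pvDupSpec_congr (s₁ s₂ : List ((String × String) × (String × String)))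
    (h : ∀ k, k ∈ s₁ ↔ k ∈ s₂) (l : List (List (String × String))) :
    pvDupSpec s₁ l = pvDupSpec s₂ l := by
  induction l generalizing s₁ s₂ with
  | nil => rfl
  | cons d rest ih =>
    simp only [pvDupSpec]
    cases hk : pvKey? d with
    | none => exact ih s₁ s₂ h
    | some k =>
      dsimp only
      by_cases hm : k ∈ s₁
      · rw [if_pos hm, if_pos ((h k).mp hm), ih s₁ s₂ h]
      · rw [if_neg hm, if_neg (fun hm2 => hm ((h k).mpr hm2))]
        exact ih _ _ (by intro k'; simp [h k'])

-- A's fold equals the reference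
theorem pvFoldA_eq (l : List (List (String × String)))
    (s : PySem.Set ((String × String) × (String × String)))
    (nl dup : List (List (String × String))) :
    (l.foldl pvStepA (s, nl, dup)).2.2 = dup ++ pvDupSpec s l := by
  induction l generalizing s nl dup with
  | nil => simp [pvDupSpec]
  | cons d rest ih =>
    simp only [List.foldl_cons, pvStepA, pvDupSpec]
    cases hk : pvKey? d with
    | none => exact ih s nl dup
    | some k =>
      dsimp only
      by_cases hm : k ∈ s
      · rw [if_neg (by simpa using hm), if_pos hm, ih]
        simp
      · rw [if_pos (by simpa using hm), if_neg hm, ih]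
        exact congrArg (dup ++ ·)
          (pvDupSpec_congr _ _ (by intro k'; simp [PySem.Set.mem_add, or_comm]) rest)

-- first occurrence index of key k, scanning from index i
def pvFIdx (k : (String × String) × (String × String)) :
    Nat → List (List (String × String)) → Option Nat
  | _, [] => none
  | i, d :: rest => if pvKey? d = some k then some i else pvFIdx k (i + 1) rest

theorem pvBuildIdx_get? (l : List (List (String × String)))
    (fi : PySem.Dict ((String × String) × (String × String)) Nat) (i : Nat)
    (k : (String × String) × (String × String)) :
    (pvBuildIdx fi i l).get? k =
      match fi.get? k with
      | some j => some j
      | none => pvFIdx k i l := by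
  induction l generalizing fi i with
  | nil => cases h : fi.get? k <;> simp [pvBuildIdx, pvFIdx, h]
  | cons d rest ih =>
    simp only [pvBuildIdx, pvFIdx]
    cases hk : pvKey? d with
    | none =>
      dsimp only
      rw [ih]
      cases fi.get? k <;> simp
    | some k₀ =>
      dsimp only
      by_cases hkk : k = k₀
      · subst hkk
        by_cases hfi : (fi.get? k).isNone
        · rw [if_pos hfi, ih, PySem.Dict.get?_insert_self]
          have hn : fi.get? k = none := by
            cases h : fi.get? k <;> simp_all
          rw [hn]; simp
        · rw [if_neg hfi, ih]
          cases h : fi.get? k with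
          | none => simp [h] at hfi
          | some j => rfl
      · have hne2 : ¬ k₀ = k := fun h => hkk h.symm
        by_cases hfi : (fi.get? k₀).isNone
        · rw [if_pos hfi, ih, PySem.Dict.get?_insert_of_ne _ _ hkk]
          cases fi.get? k <;> simp [hne2]
        · rw [if_neg hfi, ih]
          cases fi.get? k <;> simp [hne2]

-- B's second pass equals the reference, under the index-table invariants
theorem pvCollect_eq (rest : List (List (String × String)))
    (fi : PySem.Dict ((String × String) × (String × String)) Nat)
    (i : Nat) (seen : List ((String × String) × (String × String)))
    (h1 : ∀ k ∈ seen, ∃ j, fi.get? k = some j ∧ j < i)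
    (h2 : ∀ k, k ∉ seen → fi.get? k = pvFIdx k i rest) :
    pvCollect fi i rest = pvDupSpec seen rest := by
  induction rest generalizing i seen with
  | nil => rfl
  | cons d rest ih =>
    simp only [pvCollect, pvDupSpec]
    cases hk : pvKey? d with
    | none =>
      dsimp only
      refine ih (i + 1) seen ?_ ?_
      · intro k hks
        obtain ⟨j, hj, hji⟩ := h1 k hks
        exact ⟨j, hj, Nat.lt_succ_of_lt hji⟩
      · intro k hks
        have hne : ¬ pvKey? d = some k := by simp [hk]
        rw [h2 k hks, pvFIdx, if_neg hne]
    | some k₀ =>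
      dsimp only
      by_cases hm : k₀ ∈ seen
      · obtain ⟨j, hj, hji⟩ := h1 k₀ hm
        rw [hj]
        dsimp only
        rw [if_pos hm, if_pos (Nat.ne_of_lt hji)]
        refine congrArg (d :: ·) (ih (i + 1) seen ?_ ?_)
        · intro k hks
          obtain ⟨j', hj', hji'⟩ := h1 k hks
          exact ⟨j', hj', Nat.lt_succ_of_lt hji'⟩
        · intro k hks
          have hne : ¬ pvKey? d = some k := by
            rw [hk]; intro h; exact hks ((Option.some.inj h) ▸ hm)
          rw [h2 k hks, pvFIdx, if_neg hne]
      · have hfi : fi.get? k₀ = some i := by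
          rw [h2 k₀ hm, pvFIdx, if_pos hk]
        rw [hfi]
        dsimp only
        rw [if_neg hm, if_neg (by simp)]
        refine ih (i + 1) (k₀ :: seen) ?_ ?_
        · intro k hks
          rcases List.mem_cons.mp hks with h | h
          · subst h; exact ⟨i, hfi, Nat.lt_succ_self i⟩
          · obtain ⟨j', hj', hji'⟩ := h1 k h
            exact ⟨j', hj', Nat.lt_succ_of_lt hji'⟩
        · intro k hks
          have hk0 : k ≠ k₀ := fun h => hks (h ▸ List.mem_cons_self ..)
          have hkns : k ∉ seen := fun h => hks (List.mem_cons_of_mem _ h)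
          have hne : ¬ pvKey? d = some k := by
            rw [hk]; intro h; exact hk0 (Option.some.inj h).symm
          rw [h2 k hkns, pvFIdx, if_neg hne]

-- ===== VERDICT (by name: the statement is the Claim_ definition above) =====
theorem dedup_rows_spec : Claim_equal_dedup_rows := by
  intro l _ _
  unfold Spec_dedup_rows dedup_rows dedup_rows_alt
  rw [pvFoldA_eq, List.nil_append]
  refine Eq.symm (pvCollect_eq l _ 0 [] (by simp) ?_)
  intro k _
  rw [pvBuildIdx_get?]
  simp [PySem.Dict.get?_empty]
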